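-- pv_equiv track=rewrite | github.com/zb3/patch-tools | bindiff.py | _find_difference_end
-- ===== SOURCE A (Python) =====
-- MIN_NON_DIFF_BYTES = 16
--
-- def _find_difference_end(bytes1, bytes2, i, total_len):
--     while True:
--         while i < total_len and bytes1[i] != bytes2[i]:
--             i += 1
--
--         if i == total_len:
--             return i
--
--         common_start = i
--         while i < total_len and i < common_start + MIN_NON_DIFF_BYTES and bytes1[i] == bytes2[i]:
--             i += 1
--
--         if i == total_len or i == common_start + MIN_NON_DIFF_BYTES:
--             return common_start
-- ===== SOURCE B (Python) =====
-- MIN_NON_DIFF_BYTES = 16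
--
-- def _find_difference_end(bytes1, bytes2, i, total_len):
--     n = total_len - i
--     # Pass 1 (backward DP): run[k] = length, capped at MIN_NON_DIFF_BYTES, of the
--     # run of equal bytes starting at offset k from i.
--     run = [0] * (n + 1)
--     for k in range(n - 1, -1, -1):
--         if bytes1[i + k] == bytes2[i + k]:
--             run[k] = min(run[k + 1] + 1, MIN_NON_DIFF_BYTES)
--     # Pass 2 (forward scan of the table): first offset whose run reaches the cap
--     # or extends to the end of the range.
--     for k in range(n):
--         r = run[k]
--         if r == MIN_NON_DIFF_BYTES or (r > 0 and k + r == n):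
--             return i + k
--     return total_len
-- ===== Notes on version B (the rewrite author's own statement) =====
-- stated objective: alternative
-- what changed: Replaces A's nested skip/count while-loops by a two-pass table algorithm: a backward dynamic-programming pass builds a capped run-length table run[k] for the run of equal bytes starting at each offset, then a forward scan returns the first offset whose run reaches the 16-byte cap or the end of the range.
import Mathlib
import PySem

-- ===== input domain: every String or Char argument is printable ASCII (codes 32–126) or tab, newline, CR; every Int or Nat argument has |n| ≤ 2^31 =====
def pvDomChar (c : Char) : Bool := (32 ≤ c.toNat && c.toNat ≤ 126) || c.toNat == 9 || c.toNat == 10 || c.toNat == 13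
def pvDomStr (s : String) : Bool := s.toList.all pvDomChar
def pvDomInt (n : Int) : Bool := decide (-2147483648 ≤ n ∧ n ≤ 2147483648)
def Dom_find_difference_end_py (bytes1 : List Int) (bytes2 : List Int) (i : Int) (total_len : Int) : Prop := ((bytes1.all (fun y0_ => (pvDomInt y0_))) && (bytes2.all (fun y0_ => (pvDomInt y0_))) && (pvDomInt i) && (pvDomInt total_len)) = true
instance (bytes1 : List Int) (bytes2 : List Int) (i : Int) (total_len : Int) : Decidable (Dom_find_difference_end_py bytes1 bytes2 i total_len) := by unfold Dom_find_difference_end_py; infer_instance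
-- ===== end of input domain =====

-- B replaces A's nested skip/count loops by a two-pass table algorithm: a backward
-- DP pass builds a capped run-length table, then a forward scan reads off the answer
-- (objective: alternative — a different algorithm of the same linear cost).

-- ===== PORT A =====
-- inner loop 1: `while i < total_len and bytes1[i] != bytes2[i]: i += 1`
def pyA_skip (bytes1 bytes2 : List Int) (tl i : Int) : Int :=
  if h : i < tl ∧ PySem.List.pyGet? bytes1 i ≠ PySem.List.pyGet? bytes2 i then
    pyA_skip bytes1 bytes2 tl (i + 1)
  else i
termination_by (tl - i).toNat
decreasing_by omega

-- inner loop 2: `while i < total_len and i < common_start + 16 and bytes1[i] == bytes2[i]: i += 1`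
def pyA_match (bytes1 bytes2 : List Int) (tl cs i : Int) : Int :=
  if h : i < tl ∧ i < cs + 16 ∧ PySem.List.pyGet? bytes1 i = PySem.List.pyGet? bytes2 i then
    pyA_match bytes1 bytes2 tl cs (i + 1)
  else i
termination_by (tl - i).toNat
decreasing_by omega

-- outer `while True`; fuel only makes the recursion total (Python A diverges when
-- i > total_len; such inputs are outside Pre_, and inside Pre_ the fuel suffices).
def pyA_outer (bytes1 bytes2 : List Int) (tl : Int) : Nat → Int → Int
  | 0, i => i
  | fuel + 1, i =>
    let j := pyA_skip bytes1 bytes2 tl i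
    if j = tl then j
    else
      let k := pyA_match bytes1 bytes2 tl j j
      if k = tl ∨ k = j + 16 then j
      else pyA_outer bytes1 bytes2 tl fuel k

def find_difference_end_py (bytes1 : List Int) (bytes2 : List Int) (i : Int) (total_len : Int) : Int :=
  pyA_outer bytes1 bytes2 total_len ((total_len - i).toNat + 1) i

-- ===== PORT B =====
-- backward DP pass `for k in range(n-1, -1, -1)` of Source B: after m steps the list is
-- [run[nn-m], …, run[nn]]; filling the table back-to-front is consing to the front
-- (run[nn] = the initial trailing 0; for n < 0 the built list is never read).
def pyB_build (bytes1 bytes2 : List Int) (i : Int) (nn : Nat) : Nat → List Int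
  | 0 => [0]
  | m + 1 =>
    let rest := pyB_build bytes1 bytes2 i nn m
    let j : Int := i + (nn : Int) - ((m : Int) + 1)
    (if PySem.List.pyGet? bytes1 j = PySem.List.pyGet? bytes2 j
       then min (rest.headD 0 + 1) 16 else 0) :: rest

-- forward scan `for k in range(n)`: first offset whose run reaches the cap or the end
def pyB_scan (run : List Int) (i n tl : Int) (k : Nat) : Int :=
  if h : (k : Int) < n then
    let r := run.getD k 0
    if r = 16 ∨ (0 < r ∧ (k : Int) + r = n) then i + k
    else pyB_scan run i n tl (k + 1)
  else tl
termination_by (n - (k : Int)).toNat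
decreasing_by omega

def find_difference_end_py_alt (bytes1 : List Int) (bytes2 : List Int) (i : Int) (total_len : Int) : Int :=
  let n := total_len - i
  let run := pyB_build bytes1 bytes2 i n.toNat n.toNat
  pyB_scan run i n total_len 0

-- ===== PRECONDITION & SPEC =====
-- Pre_ excludes i > total_len (Python A loops forever) and scans that leave the
-- buffers (i below -len or total_len above a buffer length), where A usually raises
-- IndexError; it thereby also excludes the rare inputs of that shape where a 16-byte
-- match run ends before the buffer does and A still returns (B's backward table pass
-- touches every index up to total_len-1 and naturally raises IndexError there).
def Pre_find_difference_end_py (bytes1 : List Int) (bytes2 : List Int) (i : Int) (total_len : Int) : Prop :=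
  i ≤ total_len ∧
    (i = total_len ∨
      (-(min (bytes1.length : Int) (bytes2.length : Int)) ≤ i ∧
        total_len ≤ min (bytes1.length : Int) (bytes2.length : Int)))
instance (bytes1 : List Int) (bytes2 : List Int) (i : Int) (total_len : Int) : Decidable (Pre_find_difference_end_py bytes1 bytes2 i total_len) := by unfold Pre_find_difference_end_py; infer_instance

def pvWitness_find_difference_end_py : List Int × List Int × Int × Int := ([1, 2, 3], [1, 0, 3], 1, 3)

def Spec_find_difference_end_py (bytes1 : List Int) (bytes2 : List Int) (i : Int) (total_len : Int) (out : Int) : Prop := out = find_difference_end_py_alt bytes1 bytes2 i total_len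
instance (bytes1 : List Int) (bytes2 : List Int) (i : Int) (total_len : Int) (out : Int) : Decidable (Spec_find_difference_end_py bytes1 bytes2 i total_len out) := by unfold Spec_find_difference_end_py; infer_instance

-- ===== CLAIM (what is proved, stated in full; the proofs are below) =====
def Claim_equal_find_difference_end_py : Prop := ∀ (bytes1 : List Int) (bytes2 : List Int) (i : Int) (total_len : Int), Dom_find_difference_end_py bytes1 bytes2 i total_len → Pre_find_difference_end_py bytes1 bytes2 i total_len → Spec_find_difference_end_py bytes1 bytes2 i total_len (find_difference_end_py bytes1 bytes2 i total_len)

-- ===== LEMMAS AND PROOFS =====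

-- length of the run of equal bytes starting at p (not capped): the common yardstick
def runL (b1 b2 : List Int) (tl p : Int) : Int :=
  if h : p < tl ∧ PySem.List.pyGet? b1 p = PySem.List.pyGet? b2 p then
    runL b1 b2 tl (p + 1) + 1
  else 0
termination_by (tl - p).toNat
decreasing_by omega

-- the first position ≥ p at which A returns / B's scan fires, phrased via runL
def firstQ (b1 b2 : List Int) (tl p : Int) : Int :=
  if h : p < tl then
    (if 16 ≤ runL b1 b2 tl p ∨ (0 < runL b1 b2 tl p ∧ p + runL b1 b2 tl p = tl) then p
     else firstQ b1 b2 tl (p + 1))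
  else tl
termination_by (tl - p).toNat
decreasing_by omega

theorem runL_nonneg (b1 b2 : List Int) (tl p : Int) : 0 ≤ runL b1 b2 tl p := by
  fun_induction runL with
  | case1 p h ih => omega
  | case2 p h => omega

theorem runL_le (b1 b2 : List Int) (tl p : Int) (hp : p ≤ tl) : runL b1 b2 tl p ≤ tl - p := by
  fun_induction runL with
  | case1 p h ih => have := ih (by omega); omega
  | case2 p h => omega

theorem runL_pos (b1 b2 : List Int) (tl p : Int) (h : 0 < runL b1 b2 tl p) :
    p < tl ∧ PySem.List.pyGet? b1 p = PySem.List.pyGet? b2 p := by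
  by_cases hc : p < tl ∧ PySem.List.pyGet? b1 p = PySem.List.pyGet? b2 p
  · exact hc
  · rw [runL, dif_neg hc] at h; omega

theorem runL_zero (b1 b2 : List Int) (tl p : Int)
    (h : ¬ (p < tl ∧ PySem.List.pyGet? b1 p = PySem.List.pyGet? b2 p)) :
    runL b1 b2 tl p = 0 := by
  rw [runL, dif_neg h]

theorem runL_succ (b1 b2 : List Int) (tl p : Int)
    (h : p < tl ∧ PySem.List.pyGet? b1 p = PySem.List.pyGet? b2 p) :
    runL b1 b2 tl p = runL b1 b2 tl (p + 1) + 1 := by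
  rw [runL, dif_pos h]

theorem firstQ_tl (b1 b2 : List Int) (tl : Int) : firstQ b1 b2 tl tl = tl := by
  rw [firstQ, dif_neg (by omega)]

-- stepping firstQ past a non-qualifying position
theorem firstQ_step (b1 b2 : List Int) (tl p : Int) (hp : p < tl)
    (h : ¬ (16 ≤ runL b1 b2 tl p ∨ (0 < runL b1 b2 tl p ∧ p + runL b1 b2 tl p = tl))) :
    firstQ b1 b2 tl p = firstQ b1 b2 tl (p + 1) := by
  rw [firstQ, dif_pos hp, if_neg h]

-- stepping firstQ past a whole non-qualifying run of matching bytes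
theorem firstQ_skip_run (b1 b2 : List Int) (tl : Int) (p : Int)
    (h16 : runL b1 b2 tl p < 16) (hend : p + runL b1 b2 tl p < tl) :
    firstQ b1 b2 tl p = firstQ b1 b2 tl (p + runL b1 b2 tl p) := by
  generalize hn : (runL b1 b2 tl p).toNat = n
  induction n generalizing p with
  | zero =>
    have h0 := runL_nonneg b1 b2 tl p
    have hz : runL b1 b2 tl p = 0 := by omega
    rw [hz]; ring_nf
  | succ n ih =>
    have hpos : 0 < runL b1 b2 tl p := by omega
    obtain ⟨hlt, heq⟩ := runL_pos b1 b2 tl p hpos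
    have hs := runL_succ b1 b2 tl p ⟨hlt, heq⟩
    have hstep : firstQ b1 b2 tl p = firstQ b1 b2 tl (p + 1) :=
      firstQ_step b1 b2 tl p hlt (by omega)
    rw [hstep, ih (p + 1) (by omega) (by omega) (by omega)]
    congr 1
    omega

-- ----- A-side: A's loops expressed through runL / firstQ -----

theorem pyA_skip_ge (b1 b2 : List Int) (tl i : Int) : i ≤ pyA_skip b1 b2 tl i := by
  fun_induction pyA_skip with
  | case1 i h ih => omega
  | case2 i h => omega

theorem pyA_skip_le (b1 b2 : List Int) (tl i : Int) (hi : i ≤ tl) : pyA_skip b1 b2 tl i ≤ tl := by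
  fun_induction pyA_skip with
  | case1 i h ih => exact ih (by omega)
  | case2 i h => omega

theorem pyA_skip_stop (b1 b2 : List Int) (tl i : Int) (h : pyA_skip b1 b2 tl i < tl) :
    PySem.List.pyGet? b1 (pyA_skip b1 b2 tl i) = PySem.List.pyGet? b2 (pyA_skip b1 b2 tl i) := by
  fun_induction pyA_skip with
  | case1 i h' ih => exact ih h
  | case2 i h' =>
    by_cases he : PySem.List.pyGet? b1 i = PySem.List.pyGet? b2 i
    · exact he
    · exact absurd ⟨h, he⟩ h'

theorem firstQ_eq_skip (b1 b2 : List Int) (tl i : Int) :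
    firstQ b1 b2 tl i = firstQ b1 b2 tl (pyA_skip b1 b2 tl i) := by
  fun_induction pyA_skip with
  | case1 i h ih =>
    rw [← ih]
    have hz : runL b1 b2 tl i = 0 := runL_zero b1 b2 tl i (by tauto)
    exact firstQ_step b1 b2 tl i h.1 (by rw [hz]; omega)
  | case2 i h => rfl

theorem pyA_match_eq (b1 b2 : List Int) (tl cs i : Int) (hi : i ≤ tl) (hcs : i ≤ cs + 16) :
    pyA_match b1 b2 tl cs i = i + min (runL b1 b2 tl i) (cs + 16 - i) := by
  fun_induction pyA_match with
  | case1 i h ih =>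
    have hrec := ih (by omega) (by omega)
    have hs := runL_succ b1 b2 tl i ⟨h.1, h.2.2⟩
    have hnn := runL_nonneg b1 b2 tl (i + 1)
    rw [hrec, hs]
    omega
  | case2 i h =>
    have hnn := runL_nonneg b1 b2 tl i
    by_cases h1 : i < tl
    · by_cases h2 : i < cs + 16
      · have hne : ¬ PySem.List.pyGet? b1 i = PySem.List.pyGet? b2 i := by tauto
        have hz : runL b1 b2 tl i = 0 := runL_zero b1 b2 tl i (by tauto)
        rw [hz]; omega
      · have : i = cs + 16 := by omega
        omega
    · have : i = tl := by omega
      have hz : runL b1 b2 tl i = 0 := runL_zero b1 b2 tl i (by omega)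
      rw [hz]; omega

theorem pyA_outer_eq_firstQ (b1 b2 : List Int) (tl : Int) (fuel : Nat) (i : Int)
    (hi : i ≤ tl) (hf : (tl - i).toNat < fuel) :
    pyA_outer b1 b2 tl fuel i = firstQ b1 b2 tl i := by
  induction fuel generalizing i with
  | zero => omega
  | succ fuel ih =>
    rw [pyA_outer]
    simp only []
    set j := pyA_skip b1 b2 tl i with hj
    have hij : i ≤ j := pyA_skip_ge b1 b2 tl i
    have hjt : j ≤ tl := pyA_skip_le b1 b2 tl i hi
    rw [firstQ_eq_skip b1 b2 tl i, ← hj]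
    by_cases hjtl : j = tl
    · rw [if_pos hjtl, hjtl, firstQ_tl]
    · rw [if_neg hjtl]
      have hjlt : j < tl := by omega
      have heq : PySem.List.pyGet? b1 j = PySem.List.pyGet? b2 j := pyA_skip_stop b1 b2 tl i hjlt
      set L := runL b1 b2 tl j with hL
      have hL1 : 1 ≤ L := by rw [hL, runL_succ b1 b2 tl j ⟨hjlt, heq⟩]
                             have := runL_nonneg b1 b2 tl (j + 1); omega
      have hLle : L ≤ tl - j := runL_le b1 b2 tl j (by omega)
      have hm : pyA_match b1 b2 tl j j = j + min L 16 := by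
        have h0 := pyA_match_eq b1 b2 tl j j (by omega) (by omega)
        rw [h0, ← hL]
        omega
      rw [hm]
      by_cases hq : 16 ≤ L ∨ (0 < L ∧ j + L = tl)
      · have hcond : j + min L 16 = tl ∨ j + min L 16 = j + 16 := by omega
        have hq' : 16 ≤ runL b1 b2 tl j ∨
            (0 < runL b1 b2 tl j ∧ j + runL b1 b2 tl j = tl) := by
          rw [← hL]; exact hq
        rw [if_pos hcond, firstQ, dif_pos hjlt, if_pos hq']
      · have hcond : ¬ (j + min L 16 = tl ∨ j + min L 16 = j + 16) := by omega
        rw [if_neg hcond]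
        have hmin : min L 16 = L := by omega
        rw [hmin]
        have hsk : firstQ b1 b2 tl j = firstQ b1 b2 tl (j + L) := by
          rw [hL]; exact firstQ_skip_run b1 b2 tl j (by omega) (by omega)
        rw [hsk]
        exact ih (j + L) (by omega) (by omega)

-- ----- B-side: the table contains min (runL) 16, the scan computes firstQ -----

theorem pyB_build_eq (b1 b2 : List Int) (i : Int) (nn : Nat) (m : Nat) (hm : m ≤ nn) :
    pyB_build b1 b2 i nn m =
      (List.range (m + 1)).map
        (fun t => min (runL b1 b2 (i + (nn : Int)) (i + ((nn - m + t : Nat) : Int))) 16) := by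
  induction m with
  | zero =>
    have hz : runL b1 b2 (i + (nn : Int)) (i + (nn : Int)) = 0 :=
      runL_zero _ _ _ _ (by simp)
    simp [pyB_build, hz]
  | succ m ih =>
    have ihm := ih (by omega)
    rw [pyB_build]
    rw [ihm]
    have hne : (0 : Nat) < m + 1 := by omega
    have hhead :
        ((List.range (m + 1)).map
          (fun t => min (runL b1 b2 (i + (nn : Int)) (i + ((nn - m + t : Nat) : Int))) 16)).headD 0
          = min (runL b1 b2 (i + (nn : Int)) (i + ((nn - m : Nat) : Int))) 16 := by
      rw [List.range_succ_eq_map]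
      simp
    rw [hhead]
    conv_rhs => rw [List.range_succ_eq_map, List.map_cons, List.map_map]
    have hj : i + (nn : Int) - ((m : Int) + 1) = i + ((nn - (m + 1) + 0 : Nat) : Int) := by
      have : ((nn - (m + 1) + 0 : Nat) : Int) = (nn : Int) - (m : Int) - 1 := by omega
      rw [this]; ring
    rw [hj]
    congr 1
    · -- heads agree
      set q : Int := i + ((nn - (m + 1) + 0 : Nat) : Int) with hq
      have hq1 : q + 1 = i + ((nn - m : Nat) : Int) := by
        have h1 : ((nn - (m + 1) + 0 : Nat) : Int) = (nn : Int) - (m : Int) - 1 := by omega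
        have h2 : ((nn - m : Nat) : Int) = (nn : Int) - (m : Int) := by omega
        rw [hq, h1, h2]; ring
      by_cases he : PySem.List.pyGet? b1 q = PySem.List.pyGet? b2 q
      · rw [if_pos he]
        have hlt : q < i + (nn : Int) := by
          have : ((nn - (m + 1) + 0 : Nat) : Int) = (nn : Int) - (m : Int) - 1 := by omega
          rw [hq, this]; omega
        rw [runL_succ b1 b2 (i + (nn : Int)) q ⟨hlt, he⟩, hq1]
        have := runL_nonneg b1 b2 (i + (nn : Int)) (i + ((nn - m : Nat) : Int))
        omega
      · rw [if_neg he, runL_zero b1 b2 (i + (nn : Int)) q (by tauto)]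
        simp
    · -- tails agree
      apply List.map_congr_left
      intro t ht
      simp only [Function.comp_apply]
      have harg : (nn - (m + 1) + Nat.succ t : Nat) = (nn - m + t : Nat) := by omega
      rw [harg]

theorem pyB_scan_eq (b1 b2 : List Int) (i : Int) (nn : Nat) (k : Nat) (hk : k ≤ nn) :
    pyB_scan (pyB_build b1 b2 i nn nn) i (nn : Int) (i + (nn : Int)) k
      = firstQ b1 b2 (i + (nn : Int)) (i + (k : Int)) := by
  generalize hd : nn - k = d
  induction d generalizing k with
  | zero =>
    have hkn : k = nn := by omega
    rw [pyB_scan, dif_neg (by omega), hkn, firstQ_tl]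
  | succ d ih =>
    have hklt : k < nn := by omega
    set tl : Int := i + (nn : Int) with htl
    have hr : (pyB_build b1 b2 i nn nn).getD k 0 = min (runL b1 b2 tl (i + (k : Int))) 16 := by
      rw [pyB_build_eq b1 b2 i nn nn (le_refl _)]
      have hk1 : k < nn + 1 := by omega
      have harg : (nn - nn + k : Nat) = k := by omega
      rw [List.getD_eq_getElem?_getD, List.getElem?_map, List.getElem?_range hk1]
      simp only [Option.map_some, Option.getD_some]
      rw [harg, htl]
    set L := runL b1 b2 tl (i + (k : Int)) with hL
    have hnn := runL_nonneg b1 b2 tl (i + (k : Int))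
    have hle : L ≤ tl - (i + (k : Int)) := runL_le b1 b2 tl (i + (k : Int)) (by omega)
    have hklt' : ((k : Nat) : Int) < (nn : Int) := by omega
    rw [pyB_scan, dif_pos hklt']
    simp only []
    rw [hr]
    by_cases hq : 16 ≤ L ∨ (0 < L ∧ (i + (k : Int)) + L = tl)
    · have hcond : min L 16 = 16 ∨ (0 < min L 16 ∧ ((k : Nat) : Int) + min L 16 = (nn : Int)) := by
        omega
      have hq' : 16 ≤ runL b1 b2 tl (i + (k : Int)) ∨
          (0 < runL b1 b2 tl (i + (k : Int)) ∧
            (i + (k : Int)) + runL b1 b2 tl (i + (k : Int)) = tl) := by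
        rw [← hL]; exact hq
      have hplt : i + (k : Int) < tl := by omega
      rw [if_pos hcond, firstQ, dif_pos hplt, if_pos hq']
    · have hcond : ¬ (min L 16 = 16 ∨ (0 < min L 16 ∧ ((k : Nat) : Int) + min L 16 = (nn : Int))) := by
        omega
      rw [if_neg hcond]
      have hq' : ¬ (16 ≤ runL b1 b2 tl (i + (k : Int)) ∨
          (0 < runL b1 b2 tl (i + (k : Int)) ∧
            (i + (k : Int)) + runL b1 b2 tl (i + (k : Int)) = tl)) := by
        rw [← hL]; exact hq
      have hstep : firstQ b1 b2 tl (i + (k : Int)) = firstQ b1 b2 tl (i + (k : Int) + 1) :=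
        firstQ_step b1 b2 tl (i + (k : Int)) (by omega) hq'
      rw [hstep]
      have hih := ih (k + 1) (by omega) (by omega)
      rw [hih]
      congr 1
      push_cast
      ring

-- ===== VERDICT (by name: the statement is the Claim_ definition above) =====
theorem find_difference_end_py_spec : Claim_equal_find_difference_end_py := by
  intro b1 b2 i tl _hdom hpre
  unfold Spec_find_difference_end_py find_difference_end_py find_difference_end_py_alt
  have hi : i ≤ tl := hpre.1
  have hA := pyA_outer_eq_firstQ b1 b2 tl ((tl - i).toNat + 1) i hi (by omega)
  have hB := pyB_scan_eq b1 b2 i (tl - i).toNat 0 (by omega)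
  rw [show i + ((((tl - i).toNat : Nat)) : Int) = tl from by omega] at hB
  rw [show ((((tl - i).toNat : Nat)) : Int) = tl - i from by omega] at hB
  rw [show i + (((0 : Nat)) : Int) = i from by simp] at hB
  show pyA_outer b1 b2 tl ((tl - i).toNat + 1) i
    = pyB_scan (pyB_build b1 b2 i (tl - i).toNat (tl - i).toNat) i (tl - i) tl 0
  rw [hA, hB]
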